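-- pv_equiv track=rewrite | github.com/CogComp/SRL-English | srl_english/src/combined_unconstrained_srl/reader.py | separate_hyphens
-- ===== SOURCE A (Python) =====
-- from typing import Dict, List, Iterable, Tuple, Any
--
-- def separate_hyphens(og_sentence: List[str]):
--     new_sentence = []
--     new_indices = []
--     i = 0
--     for word in og_sentence:
--         broken_h_indices = []
--         h_idx = word.find('-')
--         bslash_idx = word.find('/')
--         h_bs_idx = min(h_idx, bslash_idx) if h_idx>=0 and bslash_idx>=0 else max(h_idx, bslash_idx)
--         prev_h_bs_idx = -1
--         while h_bs_idx > 0: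
--             subsection = word[prev_h_bs_idx+1:h_bs_idx+1]
--             broken_h_indices.append(i)
--             new_sentence.append(subsection)
--             prev_h_bs_idx = h_bs_idx
--             h_idx = word.find('-', h_bs_idx+1)
--             bslash_idx = word.find('/', h_bs_idx+1)
--             h_bs_idx = min(h_idx, bslash_idx) if h_idx>=0 and bslash_idx>=0 else max(h_idx, bslash_idx)
--             i += 1
--         subsection = word[prev_h_bs_idx+1:]
--         new_sentence.append(subsection)
--         broken_h_indices.append(i)
--         i += 1
--         new_indices.append(broken_h_indices)
--     return new_sentence, new_indices
-- ===== SOURCE B (Python) =====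
-- def separate_hyphens(og_sentence):
--     new_sentence = []
--     new_indices = []
--     i = 0
--     for word in og_sentence:
--         positions = [j for j, c in enumerate(word) if c == '-' or c == '/']
--         if not positions or positions[0] == 0:
--             # a leading delimiter (or none at all) leaves the word unsplit
--             segments = [word]
--         else:
--             segments = []
--             start = 0
--             for p in positions:
--                 segments.append(word[start:p + 1])
--                 start = p + 1
--             segments.append(word[start:])
--         new_sentence.extend(segments)
--         new_indices.append(list(range(i, i + len(segments))))
--         i += len(segments)
--     return new_sentence, new_indices
-- ===== Notes on version B (the rewrite author's own statement) =====
-- stated objective: alternative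
-- what changed: Replaces the find-with-offset while loop (repeated str.find calls for '-' and '/' combined via a min/max trick) by a two-pass decomposition: first collect all delimiter positions with one enumerate comprehension, then slice the word along those positions; indices are emitted as one range per word instead of incrementally.
import Mathlib
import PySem

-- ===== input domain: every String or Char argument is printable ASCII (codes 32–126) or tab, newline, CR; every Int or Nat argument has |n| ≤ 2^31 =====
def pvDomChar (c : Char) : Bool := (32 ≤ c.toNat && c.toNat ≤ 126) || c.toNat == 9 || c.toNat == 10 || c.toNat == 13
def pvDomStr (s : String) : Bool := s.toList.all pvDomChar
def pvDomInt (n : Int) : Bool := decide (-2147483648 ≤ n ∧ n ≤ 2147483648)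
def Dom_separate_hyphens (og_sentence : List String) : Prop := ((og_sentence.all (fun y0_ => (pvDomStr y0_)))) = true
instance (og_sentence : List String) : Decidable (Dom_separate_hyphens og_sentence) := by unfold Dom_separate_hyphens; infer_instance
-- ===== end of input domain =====

-- B replaces A's find-with-offset while loop by a two-pass decomposition (collect all delimiter
-- positions with one enumerate pass, then slice along them); same cost, alternative structure.

-- ===== PORT A =====
-- the `min(...) if ... else max(...)` combination A applies to the two find results
def pvComb (h_idx bslash_idx : Int) : Int :=
  if 0 ≤ h_idx ∧ 0 ≤ bslash_idx then min h_idx bslash_idx else max h_idx bslash_idx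

-- A's inner `while h_bs_idx > 0` loop; the fuel only makes the recursion structural
-- (`word.length + 1` always suffices).  Returns (new_sentence, broken_h_indices, i, prev_h_bs_idx).
def pvALoop (word : String) : Nat → Int → Int → Int → List String → List Int →
    List String × List Int × Int × Int
  | 0, _, prev, i, ns, bis => (ns, bis, i, prev)
  | fuel + 1, h_bs_idx, prev, i, ns, bis =>
    if 0 < h_bs_idx then
      let subsection := PySem.Str.slice word (some (prev + 1)) (some (h_bs_idx + 1))
      let bis := bis ++ [i]
      let ns := ns ++ [subsection]
      let h_idx := PySem.Str.findFrom word "-" (h_bs_idx + 1)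
      let bslash_idx := PySem.Str.findFrom word "/" (h_bs_idx + 1)
      pvALoop word fuel (pvComb h_idx bslash_idx) h_bs_idx (i + 1) ns bis
    else (ns, bis, i, prev)

def separate_hyphens (og_sentence : List String) : List String × List (List Int) :=
  let res := og_sentence.foldl
    (fun (acc : List String × List (List Int) × Int) word =>
      let h_idx := PySem.Str.find word "-"
      let bslash_idx := PySem.Str.find word "/"
      let r := pvALoop word (word.toList.length + 1) (pvComb h_idx bslash_idx) (-1) acc.2.2 acc.1 []
      let subsection := PySem.Str.slice word (some (r.2.2.2 + 1)) none
      (r.1 ++ [subsection], acc.2.1 ++ [r.2.1 ++ [r.2.2.1]], r.2.2.1 + 1))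
    ([], [], 0)
  (res.1, res.2.1)

-- ===== PORT B =====
-- B's per-word segmentation: all delimiter positions first, then slice along them
def pvBSegs (word : String) : List String :=
  let positions := (PySem.List.enumerate word.toList).filterMap
    (fun jc => if jc.2 = '-' ∨ jc.2 = '/' then some jc.1 else none)
  match positions with
  | [] => [word]
  | p0 :: _ =>
    if p0 = 0 then [word]
    else
      let r := positions.foldl
        (fun (acc : List String × Int) p =>
          (acc.1 ++ [PySem.Str.slice word (some acc.2) (some (p + 1))], p + 1)) ([], 0)
      r.1 ++ [PySem.Str.slice word (some r.2) none]

def separate_hyphens_alt (og_sentence : List String) : List String × List (List Int) :=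
  let res := og_sentence.foldl
    (fun (acc : List String × List (List Int) × Int) word =>
      let segments := pvBSegs word
      let n : Int := PySem.List.len segments
      (acc.1 ++ segments, acc.2.1 ++ [PySem.List.pyRange acc.2.2 (acc.2.2 + n) 1], acc.2.2 + n))
    ([], [], 0)
  (res.1, res.2.1)

-- ===== PRECONDITION & SPEC =====
def Spec_separate_hyphens (og_sentence : List String) (out : List String × List (List Int)) : Prop := out = separate_hyphens_alt og_sentence
instance (og_sentence : List String) (out : List String × List (List Int)) : Decidable (Spec_separate_hyphens og_sentence out) := by unfold Spec_separate_hyphens; infer_instance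

-- ===== CLAIM (what is proved, stated in full; the proofs are below) =====
def Claim_equal_separate_hyphens : Prop := ∀ (og_sentence : List String), Dom_separate_hyphens og_sentence → Spec_separate_hyphens og_sentence (separate_hyphens og_sentence)

-- ===== LEMMAS AND PROOFS =====

-- the delimiter predicate both programs test
def pvIsD (c : Char) : Bool := c == '-' || c == '/'

-- reference segmentation: cut after every delimiter (no leading-delimiter special case)
def pvSegs (t : List Char) : List (List Char) :=
  if h : t.findIdx pvIsD < t.length then
    t.take (t.findIdx pvIsD + 1) :: pvSegs (t.drop (t.findIdx pvIsD + 1))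
  else [t]
termination_by t.length
decreasing_by simp; omega

-- the segmentation a whole word receives (a leading delimiter disables splitting)
def pvWordSegs (w : List Char) : List (List Char) :=
  if 0 < w.findIdx pvIsD ∧ w.findIdx pvIsD < w.length then pvSegs w else [w]

lemma pvSegs_ne_nil (t : List Char) : pvSegs t ≠ [] := by
  unfold pvSegs; split <;> simp

lemma pvSegs_flatten (t : List Char) : (pvSegs t).flatten = t := by
  unfold pvSegs; split
  · simp [pvSegs_flatten (t.drop (t.findIdx pvIsD + 1))]
  · simp
termination_by t.length
decreasing_by simp; omega

lemma pv_singleton_prefix_drop (c : Char) (t : List Char) (i : Nat) :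
    [c] <+: t.drop i ↔ t[i]? = some c := by
  rw [show ([c] <+: t.drop i) ↔ (t.drop i).head? = some c from by
        cases t.drop i <;> simp [List.cons_prefix_iff],
      List.head?_drop]

-- Python str.find for a single character, characterized by findIdx
lemma pv_find_single (t : List Char) (c : Char) :
    PySem.Chars.find t [c] =
      if t.findIdx (· == c) < t.length then (t.findIdx (· == c) : Int) else -1 := by
  by_cases hd : t.findIdx (· == c) < t.length
  · have hc : t[t.findIdx (· == c)] = c := by
      have := List.findIdx_getElem (w := hd)
      simpa using this
    have hmem : c ∈ t := hc ▸ List.getElem_mem hd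
    have hnn : 0 ≤ PySem.Chars.find t [c] :=
      (PySem.Chars.find_nonneg_iff t [c]).mpr ((List.singleton_infix_iff c t).mpr hmem)
    obtain ⟨hpre, hmin⟩ := PySem.Chars.find_spec hnn
    have htoNat : (PySem.Chars.find t [c]).toNat = t.findIdx (· == c) := by
      have h1 : t[(PySem.Chars.find t [c]).toNat]? = some c :=
        (pv_singleton_prefix_drop c t _).mp hpre
      rcases Nat.lt_trichotomy (PySem.Chars.find t [c]).toNat (t.findIdx (· == c)) with h | h | h
      · exfalso
        have hlt : (PySem.Chars.find t [c]).toNat < t.length :=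
          lt_of_lt_of_le h (List.findIdx_le_length)
        have := List.not_of_lt_findIdx h
        rw [List.getElem?_eq_getElem hlt] at h1
        exact absurd (Option.some.inj h1) (by simpa using this)
      · exact h
      · exfalso
        exact hmin _ h ((pv_singleton_prefix_drop c t _).mpr
          (by rw [List.getElem?_eq_getElem hd]; simp [hc]))
    rw [if_pos hd, ← htoNat, Int.toNat_of_nonneg hnn]
  · have : c ∉ t := by
      intro hmem
      obtain ⟨i, hi, hci⟩ := List.getElem_of_mem hmem
      have : t.findIdx (· == c) ≤ i := by
        by_contra hlt
        have := List.not_of_lt_findIdx (Nat.lt_of_not_le hlt)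
        simp_all
      omega
    rw [if_neg hd, (PySem.Chars.find_eq_neg_one_iff t [c]).mpr]
    simpa [List.singleton_infix_iff]

-- findIdx of a disjunction is the min of the findIdx's
lemma pv_findIdx_or (t : List Char) :
    t.findIdx pvIsD = min (t.findIdx (· == '-')) (t.findIdx (· == '/')) := by
  induction t with
  | nil => simp
  | cons c t ih =>
    have hD : pvIsD c = ((c == '-') || (c == '/')) := rfl
    cases hb1 : (c == '-') <;> cases hb2 : (c == '/') <;>
      simp [List.findIdx_cons, hD, hb1, hb2, ih]

-- A's combined find value, from absolute position k
def pvCombAt (w : List Char) (k : Nat) : Int :=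
  pvComb (PySem.Chars.findFrom w ['-'] (k : Int)) (PySem.Chars.findFrom w ['/'] (k : Int))

lemma pvCombAt_eq (w : List Char) (k : Nat) (hk : k ≤ w.length) :
    pvCombAt w k =
      if (w.drop k).findIdx pvIsD < (w.drop k).length
      then ((k + (w.drop k).findIdx pvIsD : Nat) : Int) else -1 := by
  have ha' := List.findIdx_le_length (p := (· == '-')) (xs := w.drop k)
  have hb' := List.findIdx_le_length (p := (· == '/')) (xs := w.drop k)
  have hd := pv_findIdx_or (w.drop k)
  unfold pvCombAt
  rw [PySem.Chars.findFrom_natCast w ['-'] k hk, PySem.Chars.findFrom_natCast w ['/'] k hk,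
      pv_find_single, pv_find_single]
  by_cases ha : (w.drop k).findIdx (· == '-') < (w.drop k).length <;>
  by_cases hb : (w.drop k).findIdx (· == '/') < (w.drop k).length <;>
    (simp only [ha, hb, if_true, if_false, pvComb, hd]
     split_ifs <;> (try exact (‹False›).elim) <;> omega)

-- the A-side loop, characterized (init = all segments but the last)
lemma pv_slice_take (word : String) (k d : Nat) (t : List Char) (ht : word.toList.drop k = t) :
    PySem.Str.slice word (some (k : Int)) (some (((k : Int) + d) + 1)) =
      String.ofList (t.take (d + 1)) := by
  apply String.toList_inj.mp
  rw [PySem.Str.toList_slice, PySem.Chars.slice_eq_listSlice]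
  have : ((k : Int) + d) + 1 = ((k + d + 1 : Nat) : Int) := by push_cast; ring
  rw [this, PySem.List.slice_natCast, ht]
  simp
  congr 1
  omega

lemma pv_slice_last (word : String) (L : Nat) :
    PySem.Str.slice word (some (L : Int)) none = String.ofList (word.toList.drop L) := by
  apply String.toList_inj.mp
  rw [PySem.Str.toList_slice, PySem.Chars.slice_eq_listSlice, PySem.List.slice_from_natCast,
    String.toList_ofList]

lemma pv_generic_last (l : List (List Char)) (hne : l ≠ []) :
    l.flatten.drop (l.dropLast.flatten.length) = l.getLast hne := by
  conv_lhs => rw [← List.dropLast_append_getLast hne]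
  rw [List.flatten_append]
  simp

lemma pv_last_eq (w : List Char) :
    w.drop ((pvSegs w).dropLast.flatten.length) = (pvSegs w).getLast (pvSegs_ne_nil w) := by
  rw [show w.drop ((pvSegs w).dropLast.flatten.length) =
      ((pvSegs w).flatten).drop ((pvSegs w).dropLast.flatten.length) from by rw [pvSegs_flatten]]
  exact pv_generic_last _ _

lemma pvALoop_spec (word : String) (fuel : Nat) :
    ∀ (k : Nat) (i : Int) (ns : List String) (bis : List Int),
      k ≤ word.toList.length → word.toList.length - k ≤ fuel →
      ((word.toList.drop k).findIdx pvIsD < (word.toList.drop k).length →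
        0 < k + (word.toList.drop k).findIdx pvIsD) →
      pvALoop word fuel (pvCombAt word.toList k) ((k : Int) - 1) i ns bis =
        (ns ++ ((pvSegs (word.toList.drop k)).dropLast).map (fun l => String.ofList l),
         bis ++ PySem.List.pyRange i (i + ((pvSegs (word.toList.drop k)).dropLast).length) 1,
         i + ((pvSegs (word.toList.drop k)).dropLast).length,
         ((k : Int) + (((pvSegs (word.toList.drop k)).dropLast).flatten).length) - 1) := by
  induction fuel with
  | zero =>
    intro k i ns bis hk hfuel hpos
    have ht : word.toList.drop k = [] := List.drop_eq_nil_of_le (by omega)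
    rw [pvCombAt_eq word.toList k hk, ht]
    have hsegs : pvSegs ([] : List Char) = [[]] := by rw [pvSegs]; simp
    simp [pvALoop, hsegs, PySem.List.pyRange_one_eq_nil le_rfl]
  | succ fuel ih =>
    intro k i ns bis hk hfuel hpos
    rw [pvCombAt_eq word.toList k hk]
    set t := word.toList.drop k with htdef
    by_cases h : t.findIdx pvIsD < t.length
    · rw [if_pos h]
      set d := t.findIdx pvIsD with hd
      have hlen : t.length = word.toList.length - k := by rw [htdef, List.length_drop]
      have hpos' : 0 < k + d := hpos h
      have hcond : (0 : Int) < ((k + d : Nat) : Int) := by exact_mod_cast hpos'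
      rw [pvALoop]
      simp only [if_pos hcond]
      -- subsection
      have hsub : PySem.Str.slice word (some (((k : Int) - 1) + 1)) (some (((k + d : Nat) : Int) + 1)) =
          String.ofList (t.take (d + 1)) := by
        have h1 : ((k : Int) - 1) + 1 = ((k : Nat) : Int) := by ring
        have h2 : (((k + d : Nat) : Int)) + 1 = ((k : Int) + d) + 1 := by push_cast; ring
        rw [h1, h2, pv_slice_take word k d t htdef.symm]
      rw [hsub]
      -- next combined find
      have hff : pvComb (PySem.Str.findFrom word "-" (((k + d : Nat) : Int) + 1))
            (PySem.Str.findFrom word "/" (((k + d : Nat) : Int) + 1)) =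
          pvCombAt word.toList (k + d + 1) := by
        have : (((k + d : Nat) : Int)) + 1 = ((k + d + 1 : Nat) : Int) := by push_cast; ring
        rw [this]
        unfold pvCombAt
        simp [PySem.Str.findFrom_eq]
      rw [hff]
      have hprev : ((k + d : Nat) : Int) = ((k + d + 1 : Nat) : Int) - 1 := by push_cast; ring
      rw [hprev]
      have hrec := ih (k + d + 1) (i + 1) (ns ++ [String.ofList (t.take (d + 1))]) (bis ++ [i])
        (by omega) (by omega)
        (fun _ => by omega)
      rw [hrec]
      have ht' : word.toList.drop (k + d + 1) = t.drop (d + 1) := by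
        rw [htdef, List.drop_drop]; congr 1
      rw [ht']
      have hsegs : pvSegs t = t.take (d + 1) :: pvSegs (t.drop (d + 1)) := by
        rw [pvSegs]; rw [dif_pos h]
      rw [hsegs, List.dropLast_cons_of_ne_nil (pvSegs_ne_nil _)]
      simp only [List.map_cons, List.flatten_cons, List.length_cons, List.length_append,
        List.length_take, List.append_assoc, List.cons_append, List.nil_append, Prod.mk.injEq]
      refine ⟨trivial, ?_, by push_cast; ring, by have := h; omega⟩
      rw [show i + 1 + (((pvSegs (t.drop (d + 1))).dropLast.length : Nat) : Int) =
            i + ((((pvSegs (t.drop (d + 1))).dropLast.length + 1 : Nat)) : Int) from by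
              push_cast; ring]
      conv_rhs => rw [PySem.List.pyRange_one_cons (by push_cast; omega)]
    · rw [if_neg h]
      have hsegs : pvSegs t = [t] := by rw [pvSegs]; rw [dif_neg h]
      rw [pvALoop, if_neg (by omega)]
      simp [hsegs, PySem.List.pyRange_one_eq_nil le_rfl]

-- the canonical per-word step both programs implement
def pvStep (acc : List String × List (List Int) × Int) (word : String) :
    List String × List (List Int) × Int :=
  (acc.1 ++ (pvWordSegs word.toList).map (fun l => String.ofList l),
   acc.2.1 ++ [PySem.List.pyRange acc.2.2 (acc.2.2 + (pvWordSegs word.toList).length) 1],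
   acc.2.2 + (pvWordSegs word.toList).length)

lemma pvA_step (acc : List String × List (List Int) × Int) (word : String) :
    (let h_idx := PySem.Str.find word "-"
     let bslash_idx := PySem.Str.find word "/"
     let r := pvALoop word (word.toList.length + 1) (pvComb h_idx bslash_idx) (-1) acc.2.2 acc.1 []
     let subsection := PySem.Str.slice word (some (r.2.2.2 + 1)) none
     ((r.1 ++ [subsection], acc.2.1 ++ [r.2.1 ++ [r.2.2.1]], r.2.2.1 + 1) :
        List String × List (List Int) × Int)) = pvStep acc word := by
  have hcomb0 : pvComb (PySem.Str.find word "-") (PySem.Str.find word "/") =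
      pvCombAt word.toList 0 := by
    unfold pvCombAt
    simp [PySem.Chars.findFrom_zero]
  simp only [hcomb0]
  by_cases hmain : 0 < word.toList.findIdx pvIsD ∧
      word.toList.findIdx pvIsD < word.toList.length
  · have hW : pvWordSegs word.toList = pvSegs word.toList := by
      unfold pvWordSegs; rw [if_pos hmain]
    have hloop := pvALoop_spec word (word.toList.length + 1) 0 acc.2.2 acc.1 []
      (by omega) (by omega)
      (by intro _; rw [List.drop_zero]; have := hmain.1; omega)
    rw [show ((-1 : Int)) = ((0 : Nat) : Int) - 1 from by norm_num]
    rw [hloop]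
    simp only [List.drop_zero] at hloop ⊢
    rw [pvStep, hW]
    have hlast : PySem.Str.slice word
        (some ((((0:Nat) : Int) + ((pvSegs word.toList).dropLast.flatten.length : Int)) - 1 + 1)) none =
        String.ofList ((pvSegs word.toList).getLast (pvSegs_ne_nil word.toList)) := by
      rw [show (((0:Nat) : Int) + ((pvSegs word.toList).dropLast.flatten.length : Int)) - 1 + 1 =
          (((pvSegs word.toList).dropLast.flatten.length : Nat) : Int) from by push_cast; ring]
      rw [pv_slice_last word, pv_last_eq word.toList]
    rw [hlast]
    have hlen : (pvSegs word.toList).length = (pvSegs word.toList).dropLast.length + 1 := by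
      have h1 : (pvSegs word.toList).length ≠ 0 := by simpa using pvSegs_ne_nil word.toList
      have h2 : (List.dropLast (pvSegs word.toList)).length = (pvSegs word.toList).length - 1 := List.length_dropLast
      omega
    simp only [Prod.mk.injEq]
    refine ⟨?_, ?_, ?_⟩
    · conv_rhs => rw [← List.dropLast_append_getLast (pvSegs_ne_nil word.toList)]
      simp [List.map_append]
    · rw [hlen]
      rw [show acc.2.2 + ((((pvSegs word.toList).dropLast.length + 1 : Nat)) : Int) =
          (acc.2.2 + ((pvSegs word.toList).dropLast.length : Int)) + 1 from by push_cast; ring]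
      rw [PySem.List.pyRange_one_succ_right (by omega)]
      simp
    · rw [hlen]; push_cast; ring
  · have h0 : ¬ (0 : Int) < pvCombAt word.toList 0 := by
      rw [pvCombAt_eq word.toList 0 (by omega)]
      simp only [List.drop_zero]
      split_ifs with hlt
      · have hz : word.toList.findIdx pvIsD = 0 := by omega
        simp [hz]
      · norm_num
    rw [pvALoop]
    simp only [if_neg h0]
    have hfin : PySem.Str.slice word (some ((-1 : Int) + 1)) none = word := by
      rw [show ((-1 : Int) + 1) = ((0 : Nat) : Int) from by norm_num, pv_slice_last word]
      simp
    rw [hfin, pvStep]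
    have hW : pvWordSegs word.toList = [word.toList] := by unfold pvWordSegs; rw [if_neg hmain]
    rw [hW]
    simp only [List.map_cons, List.map_nil, List.length_cons, List.length_nil, Prod.mk.injEq]
    refine ⟨by simp, ?_, by push_cast; ring⟩
    rw [show acc.2.2 + ((0 + 1 : Nat) : Int) = acc.2.2 + 1 from by push_cast; ring]
    rw [PySem.List.pyRange_one_cons (by omega), PySem.List.pyRange_one_eq_nil (by omega)]
    simp

-- B's delimiter-position list, with a general start offset
lemma pvPos_decomp (t : List Char) (s : Int) :
    (PySem.List.enumerate t s).filterMap
        (fun jc => if jc.2 = '-' ∨ jc.2 = '/' then some jc.1 else none) =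
      if t.findIdx pvIsD < t.length
      then (s + t.findIdx pvIsD) ::
        (PySem.List.enumerate (t.drop (t.findIdx pvIsD + 1)) (s + t.findIdx pvIsD + 1)).filterMap
          (fun jc => if jc.2 = '-' ∨ jc.2 = '/' then some jc.1 else none)
      else [] := by
  induction t generalizing s with
  | nil => simp [PySem.List.enumerate]
  | cons c t ih =>
    have hD : pvIsD c = ((c == '-') || (c == '/')) := rfl
    rw [PySem.List.enumerate_cons]
    cases hb : pvIsD c with
    | true =>
      have hc : c = '-' ∨ c = '/' := by
        rw [hD] at hb; rcases Bool.or_eq_true_iff.mp hb with h | h <;>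
          [exact Or.inl (by simpa using h); exact Or.inr (by simpa using h)]
      simp [List.findIdx_cons, hb, hc]
    | false =>
      have hc : ¬ (c = '-' ∨ c = '/') := by
        rw [hD] at hb; rintro (h | h) <;> simp [h] at hb
      rw [List.filterMap_cons]
      simp only [hc, if_false]
      rw [ih (s + 1)]
      simp only [List.findIdx_cons, hb, cond_false]
      by_cases hlt : t.findIdx pvIsD < t.length
      · rw [if_pos hlt, if_pos (show (t.findIdx pvIsD + 1) < (c :: t).length by rw [List.length_cons]; omega)]
        rw [List.drop_succ_cons]
        push_cast
        ring_nf
      · rw [if_neg hlt, if_neg (show ¬ ((t.findIdx pvIsD + 1) < (c :: t).length) by rw [List.length_cons]; omega)]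

lemma pvBFold (word : String) (n : Nat) :
    ∀ (t : List Char) (k : Nat) (acc : List String),
      t.length ≤ n → word.toList.drop k = t →
      ((PySem.List.enumerate t (k : Int)).filterMap
          (fun jc => if jc.2 = '-' ∨ jc.2 = '/' then some jc.1 else none)).foldl
        (fun (acc : List String × Int) p =>
          (acc.1 ++ [PySem.Str.slice word (some acc.2) (some (p + 1))], p + 1)) (acc, (k : Int)) =
      (acc ++ ((pvSegs t).dropLast).map (fun l => String.ofList l),
       (k : Int) + ((pvSegs t).dropLast).flatten.length) := by
  induction n with
  | zero =>
    intro t k acc hn ht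
    have : t = [] := List.eq_nil_of_length_eq_zero (Nat.le_zero.mp hn)
    subst this
    rw [pvPos_decomp]
    simp [pvSegs]
  | succ n ih =>
    intro t k acc hn ht
    rw [pvPos_decomp]
    by_cases h : t.findIdx pvIsD < t.length
    · rw [if_pos h]
      set d := t.findIdx pvIsD with hd
      rw [List.foldl_cons]
      have hslice := pv_slice_take word k d t ht
      have hcast : (k : Int) + (d : Int) + 1 = ((k + d + 1 : Nat) : Int) := by push_cast; ring
      have ht' : word.toList.drop (k + d + 1) = t.drop (d + 1) := by
        rw [← ht, List.drop_drop]; congr 1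
      have hrec := ih (t.drop (d + 1)) (k + d + 1) (acc ++ [String.ofList (t.take (d + 1))])
        (by have hld : (t.drop (d + 1)).length = t.length - (d + 1) := List.length_drop; omega) ht'
      rw [hslice, hcast, hrec]
      have hsegs : pvSegs t = t.take (d + 1) :: pvSegs (t.drop (d + 1)) := by
        rw [pvSegs]; rw [dif_pos h]
      rw [hsegs, List.dropLast_cons_of_ne_nil (pvSegs_ne_nil _)]
      simp only [List.map_cons, List.flatten_cons, List.length_append, List.append_assoc,
        List.cons_append, List.nil_append, List.length_take, Prod.mk.injEq]
      refine ⟨by simp, ?_⟩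
      push_cast
      omega
    · rw [if_neg h]
      simp only [List.foldl_nil]
      have hsegs : pvSegs t = [t] := by rw [pvSegs]; rw [dif_neg h]
      rw [hsegs]
      simp

lemma pvBSegs_eq (word : String) :
    pvBSegs word = (pvWordSegs word.toList).map (fun l => String.ofList l) := by
  unfold pvBSegs
  have hfold := pvBFold word word.toList.length word.toList 0 [] le_rfl (by simp)
  simp only [Nat.cast_zero, zero_add, List.nil_append] at hfold
  by_cases h : word.toList.findIdx pvIsD < word.toList.length
  · rw [pvPos_decomp word.toList 0, if_pos h] at hfold ⊢
    by_cases h0 : word.toList.findIdx pvIsD = 0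
    · have hz0 : ((0 : Int) + ↑(word.toList.findIdx pvIsD)) = 0 := by rw [h0]; simp
      simp only [hz0]
      have : pvWordSegs word.toList = [word.toList] := by
        unfold pvWordSegs; rw [if_neg (by omega)]
      simp [this]
    · have hne : ((0 : Int) + ↑(word.toList.findIdx pvIsD)) ≠ 0 := by
        simpa using fun hh => h0 (by exact_mod_cast hh)
      simp only [if_neg hne]
      rw [hfold]
      have hW : pvWordSegs word.toList = pvSegs word.toList := by
        unfold pvWordSegs; rw [if_pos ⟨Nat.pos_of_ne_zero h0, h⟩]
      rw [hW]
      show List.map (fun l => String.ofList l) (pvSegs word.toList).dropLast ++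
          [PySem.Str.slice word (some (((pvSegs word.toList).dropLast.flatten.length : Nat) : Int))] =
        List.map (fun l => String.ofList l) (pvSegs word.toList)
      rw [pv_slice_last word, pv_last_eq word.toList]
      conv_rhs => rw [← List.dropLast_append_getLast (pvSegs_ne_nil word.toList)]
      simp
  · rw [pvPos_decomp word.toList 0, if_neg h] at hfold ⊢
    have : pvWordSegs word.toList = [word.toList] := by
      unfold pvWordSegs; rw [if_neg (by omega)]
    simp [this]

lemma pvB_step (acc : List String × List (List Int) × Int) (word : String) :
    (let segments := pvBSegs word
     let n : Int := PySem.List.len segments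
     ((acc.1 ++ segments, acc.2.1 ++ [PySem.List.pyRange acc.2.2 (acc.2.2 + n) 1], acc.2.2 + n) :
        List String × List (List Int) × Int)) = pvStep acc word := by
  simp only [pvBSegs_eq, PySem.List.len_eq, List.length_map, pvStep]

-- ===== VERDICT (by name: the statement is the Claim_ definition above) =====
theorem separate_hyphens_spec : Claim_equal_separate_hyphens := by
  intro og _
  unfold Spec_separate_hyphens separate_hyphens separate_hyphens_alt
  have : ∀ acc : List String × List (List Int) × Int,
      og.foldl (fun acc word =>
        let h_idx := PySem.Str.find word "-"
        let bslash_idx := PySem.Str.find word "/"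
        let r := pvALoop word (word.toList.length + 1) (pvComb h_idx bslash_idx) (-1) acc.2.2 acc.1 []
        let subsection := PySem.Str.slice word (some (r.2.2.2 + 1)) none
        (r.1 ++ [subsection], acc.2.1 ++ [r.2.1 ++ [r.2.2.1]], r.2.2.1 + 1)) acc =
      og.foldl (fun acc word =>
        let segments := pvBSegs word
        let n : Int := PySem.List.len segments
        (acc.1 ++ segments, acc.2.1 ++ [PySem.List.pyRange acc.2.2 (acc.2.2 + n) 1], acc.2.2 + n)) acc := by
    intro acc
    refine List.foldl_ext _ _ acc (fun a w _ => ?_)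
    rw [pvA_step a w, ← pvB_step a w]
  simp only [this]
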